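-- pv_equiv track=rewrite | github.com/kristinajoks/bytegame | BYTE/models/board.py | return_position
-- ===== SOURCE A (Python) =====
-- def return_position(start, target, my_dict):
--     visited = set()
--     queue = [(start, [start])]
--
--     while queue:
--         current, path = queue.pop(0)
--         if current == target:
--             #da li je startna pozicija u putanji
--             if start in path:
--                 # prva pre ciljne
--                 for i in range(len(path) - 1, 0, -1):
--                     if path[i] == target and i > 1:  # element pre ciljne
--                         return path[i - 1]
--             else:
--
--                 return path
--
--         if current not in visited:
--             visited.add(current)
--             for key, value in my_dict.items():
--                 neighbors = value
--                 if current in neighbors: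
--                     queue.append((key, path + [key]))
--     return None
-- ===== SOURCE B (Python) =====
-- def return_position(start, target, my_dict):
--     # Precompute the reverse-adjacency map once, then BFS with (node, parent, depth)
--     # instead of full paths; answer = parent of target on the first popped path of length >= 3.
--     preds = {}
--     for key, value in my_dict.items():
--         for v in dict.fromkeys(value):
--             preds.setdefault(v, []).append(key)
--     visited = set()
--     queue = [(start, None, 0)]
--     head = 0
--     while head < len(queue):
--         node, parent, depth = queue[head]
--         head += 1
--         if node == target and depth >= 2:
--             return parent
--         if node not in visited:
--             visited.add(node)
--             for k in preds.get(node, []):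
--                 queue.append((k, node, depth + 1))
--     return None
-- ===== Notes on version B (the rewrite author's own statement) =====
-- stated objective: alternative
-- what changed: B precomputes a reverse-adjacency map in one pass and runs the BFS carrying only (node, parent, depth) instead of scanning the whole dict per popped node and copying full paths; the answer is the parent of target on the first popped path with at least 2 edges. It trades A's per-pop dict scan for an upfront index build, so it wins only when many nodes are expanded.
import Mathlib
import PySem

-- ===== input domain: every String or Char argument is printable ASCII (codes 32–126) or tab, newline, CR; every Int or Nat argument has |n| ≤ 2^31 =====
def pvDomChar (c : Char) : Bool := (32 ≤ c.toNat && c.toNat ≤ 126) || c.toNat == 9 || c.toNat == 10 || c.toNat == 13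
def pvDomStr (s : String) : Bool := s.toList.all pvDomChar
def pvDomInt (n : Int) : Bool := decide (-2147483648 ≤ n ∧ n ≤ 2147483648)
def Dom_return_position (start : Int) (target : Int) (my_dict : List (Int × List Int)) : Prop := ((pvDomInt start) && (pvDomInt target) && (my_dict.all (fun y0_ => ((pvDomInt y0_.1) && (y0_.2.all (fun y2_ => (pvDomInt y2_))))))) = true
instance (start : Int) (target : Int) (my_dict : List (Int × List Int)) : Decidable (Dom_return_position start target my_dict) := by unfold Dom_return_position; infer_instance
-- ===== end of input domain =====

-- B replaces A's per-pop scan of the whole dict and full-path copies by a precomputed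
-- reverse-adjacency map and a BFS over (node, parent, depth) (objective: alternative).

-- ===== PORT A =====
-- Python 'for i in range(len(path)-1, 0, -1): if path[i]==target and i>1: return path[i-1]'
-- ported as a countdown over i = n, n-1, …, 1 (exact: the range is that descending list; all
-- indices are nonnegative and < len(path), so path[i] is path[i]?).
def forloopA (path : List Int) (target : Int) : Nat → Option Int
  | 0 => none
  | Nat.succ j =>
      if path[j + 1]? = some target ∧ j + 1 > 1 then path[j]?
      else forloopA path target j

-- the while-loop of A; 'items' is the dict's item list; the fuel only makes the recursion
-- total (each node expands at most once, so the fuel chosen below is never exhausted).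
def loopA (start target : Int) (items : List (Int × List Int)) :
    Nat → List (Int × List Int) → PySem.Set Int → Option Int
  | 0, _, _ => none
  | _ + 1, [], _ => none
  | f + 1, (current, path) :: rest, visited =>
      match (if current = target then
               (if start ∈ path then forloopA path target (path.length - 1)
                else none)  -- Python: 'return path' (a list, not an int) — unreachable: every queued path begins with start
             else none) with
      | some r => some r
      | none =>
          if visited.contains current then loopA start target items f rest visited
          else
            loopA start target items f
              (rest ++ items.foldl
                (fun acc kv => if current ∈ kv.2 then acc ++ [(kv.1, path ++ [kv.1])] else acc) [])
              (PySem.Set.add visited current)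

def return_position (start : Int) (target : Int) (my_dict : List (Int × List Int)) : Option Int :=
  let items := (PySem.Dict.ofList my_dict).items  -- the Python argument is a dict: duplicate keys merge
  loopA start target items (items.length * items.length + items.length + 2)
    [(start, [start])] PySem.Set.empty

-- ===== PORT B =====
-- preds[v] = the keys whose value list contains v, in dict order (dict.fromkeys = PySem.List.dedup)
def buildPreds (items : List (Int × List Int)) : PySem.Dict Int (List Int) :=
  items.foldl
    (fun d kv => (PySem.List.dedup kv.2).foldl (fun d v => d.modify v [] (fun l => l ++ [kv.1])) d)
    PySem.Dict.empty

def loopB (target : Int) (preds : PySem.Dict Int (List Int)) :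
    Nat → List (Int × Option Int × Int) → PySem.Set Int → Option Int
  | 0, _, _ => none
  | _ + 1, [], _ => none
  | f + 1, (node, parent, depth) :: rest, visited =>
      if node = target ∧ 2 ≤ depth then parent
      else if visited.contains node then loopB target preds f rest visited
      else
        loopB target preds f
          (rest ++ (preds.getD node []).map (fun k => (k, some node, depth + 1)))
          (PySem.Set.add visited node)

def return_position_alt (start : Int) (target : Int) (my_dict : List (Int × List Int)) : Option Int :=
  let items := (PySem.Dict.ofList my_dict).items
  loopB target (buildPreds items) (items.length * items.length + items.length + 2)
    [(start, none, 0)] PySem.Set.empty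

-- ===== PRECONDITION & SPEC =====
def Spec_return_position (start : Int) (target : Int) (my_dict : List (Int × List Int)) (out : Option Int) : Prop := out = return_position_alt start target my_dict
instance (start : Int) (target : Int) (my_dict : List (Int × List Int)) (out : Option Int) : Decidable (Spec_return_position start target my_dict out) := by unfold Spec_return_position; infer_instance

-- ===== CLAIM (what is proved, stated in full; the proofs are below) =====
def Claim_equal_return_position : Prop := ∀ (start : Int) (target : Int) (my_dict : List (Int × List Int)), Dom_return_position start target my_dict → Spec_return_position start target my_dict (return_position start target my_dict)

-- ===== LEMMAS AND PROOFS =====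

-- relation between one A-queue entry (node, path) and one B-queue entry (node, parent, depth)
def entryRel (start : Int) (a : Int × List Int) (b : Int × Option Int × Int) : Prop :=
  b.1 = a.1 ∧ a.2 ≠ [] ∧ a.2.head? = some start ∧ a.2.getLast? = some a.1 ∧
  b.2.2 = (a.2.length : Int) - 1 ∧ (2 ≤ a.2.length → b.2.1 = a.2[a.2.length - 2]?)

lemma forloopA_spec (path : List Int) (target : Int) (h : path.getLast? = some target) :
    forloopA path target (path.length - 1) =
      if 3 ≤ path.length then path[path.length - 2]? else none := by
  by_cases h3 : 3 ≤ path.length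
  · obtain ⟨n, hl⟩ : ∃ n, path.length = n + 3 := ⟨path.length - 3, by omega⟩
    rw [if_pos h3, hl]
    have hlast : path[n + 2]? = some target := by
      rw [← h, List.getLast?_eq_getElem?, hl]; rfl
    show forloopA path target (n + 2) = path[n + 1]?
    unfold forloopA
    rw [if_pos (And.intro hlast (by omega))]
  · rw [if_neg h3]
    match hl : path.length with
    | 0 =>
        have hnil : path = [] := List.length_eq_zero_iff.mp hl
        rw [hnil] at h; simp at h
    | 1 => simp [forloopA]
    | 2 => simp [forloopA]
    | (n + 3) => rw [hl] at h3; omega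

lemma head?_mem {α : Type} {x : α} {l : List α} (h : l.head? = some x) : x ∈ l := by
  cases l with
  | nil => simp at h
  | cons a t => simp at h; simp [h]

-- the per-pop scan of A produces exactly the filtered keys, paired with the extended path
lemma foldl_append_entries (items : List (Int × List Int)) (current : Int) (path : List Int) :
    ∀ acc : List (Int × List Int),
      items.foldl
        (fun acc kv => if current ∈ kv.2 then acc ++ [(kv.1, path ++ [kv.1])] else acc) acc
      = acc ++ (items.filter (fun kv => decide (current ∈ kv.2))).map
          (fun kv => (kv.1, path ++ [kv.1])) := by
  induction items with
  | nil => simp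
  | cons kv rest ih =>
      intro acc
      simp only [List.foldl_cons, List.filter_cons]
      by_cases hc : current ∈ kv.2
      · rw [if_pos hc, ih]; simp [hc]
      · rw [if_neg hc, ih]; simp [hc]

lemma getD_buildPreds (items : List (Int × List Int)) (c : Int) :
    (buildPreds items).getD c [] =
      (items.filter (fun kv => decide (c ∈ kv.2))).map (·.1) := by
  unfold buildPreds
  suffices h : ∀ (d : PySem.Dict Int (List Int)),
      (items.foldl
        (fun d kv => (PySem.List.dedup kv.2).foldl (fun d v => d.modify v [] (fun l => l ++ [kv.1])) d)
        d).getD c []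
      = d.getD c [] ++ (items.filter (fun kv => decide (c ∈ kv.2))).map (·.1) by
    simpa using h PySem.Dict.empty
  induction items with
  | nil => simp
  | cons kv rest ih =>
      intro d
      simp only [List.foldl_cons, List.filter_cons]
      rw [ih]
      have hinner :
          ((PySem.List.dedup kv.2).foldl (fun d v => d.modify v [] (fun l => l ++ [kv.1])) d).getD c []
            = d.getD c [] ++ (if c ∈ kv.2 then [kv.1] else []) := by
        have hmap :
            (PySem.List.dedup kv.2).foldl (fun d v => d.modify v [] (fun l => l ++ [kv.1])) d
              = ((PySem.List.dedup kv.2).map (fun v => (v, kv.1))).foldl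
                  (fun d p => d.modify p.1 [] (fun l => l ++ [p.2])) d := by
          rw [List.foldl_map]
        rw [hmap, PySem.Dict.getD_foldl_modify_append]
        congr 1
        have hfil : ((PySem.List.dedup kv.2).map (fun v => (v, kv.1))).filter (fun p => p.1 == c)
            = ((PySem.List.dedup kv.2).filter (fun v => v == c)).map (fun v => (v, kv.1)) := by
          rw [List.filter_map]; rfl
        rw [hfil, List.map_map]
        by_cases hc : c ∈ kv.2
        · have hmem : c ∈ PySem.List.dedup kv.2 := (PySem.List.mem_dedup _ _).mpr hc
          have hnd : (PySem.List.dedup kv.2).Nodup := PySem.List.nodup_dedup kv.2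
          have hcount : (PySem.List.dedup kv.2).count c = 1 :=
            List.count_eq_one_of_mem hnd hmem
          have hface : ((PySem.List.dedup kv.2).filter (fun v => v == c)) = [c] := by
            have hlen : ((PySem.List.dedup kv.2).filter (fun v => v == c)).length = 1 := by
              rw [← List.countP_eq_length_filter]
              simpa [List.count] using hcount
            have hall : ∀ x ∈ (PySem.List.dedup kv.2).filter (fun v => v == c), x = c := by
              intro x hx
              have := List.of_mem_filter hx
              simpa using this
            match hf : (PySem.List.dedup kv.2).filter (fun v => v == c) with
            | [] => rw [hf] at hlen; simp at hlen
            | [x] =>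
                have hx : x = c := hall x (by rw [hf]; simp)
                rw [hx]
            | x :: y :: t => rw [hf] at hlen; simp at hlen
          rw [hface]; simp [hc]
        · have hface : ((PySem.List.dedup kv.2).filter (fun v => v == c)) = [] := by
            rw [List.filter_eq_nil_iff]
            intro x hx hbeq
            have hx' : x ∈ kv.2 := (PySem.List.mem_dedup _ _).mp hx
            have hxc : x = c := by simpa using hbeq
            exact hc (hxc ▸ hx')
          rw [hface]; simp [hc]
      rw [hinner]
      by_cases hc : c ∈ kv.2 <;> simp [hc, List.append_assoc]

lemma forall₂_append_entries (start current : Int) (path : List Int)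
    (hne : path ≠ []) (hhead : path.head? = some start) (hlast : path.getLast? = some current)
    (keys : List Int) (depth : Int) (hd : depth = (path.length : Int) - 1) :
    List.Forall₂ (entryRel start)
      (keys.map (fun k => (k, path ++ [k])))
      (keys.map (fun k => (k, some current, depth + 1))) := by
  induction keys with
  | nil => exact List.Forall₂.nil
  | cons k t ih =>
      refine List.Forall₂.cons ?_ ih
      have hlen1 : 1 ≤ path.length := List.length_pos_iff.mpr hne
      refine ⟨rfl, by simp, ?_, by simp, ?_, ?_⟩
      · show (path ++ [k]).head? = some start
        cases path with
        | nil => exact absurd rfl hne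
        | cons a t2 => simpa using hhead
      · show depth + 1 = ((path ++ [k]).length : Int) - 1
        simp [hd]
      · intro _
        show some current = (path ++ [k])[(path ++ [k]).length - 2]?
        have hlapp : (path ++ [k]).length = path.length + 1 := by simp
        have h2 : (path ++ [k]).length - 2 = path.length - 1 := by omega
        rw [h2]
        have hidx : path.length - 1 < path.length := by omega
        rw [List.getElem?_append_left hidx, ← List.getLast?_eq_getElem?, hlast]

lemma loop_eq (start target : Int) (items : List (Int × List Int)) :
    ∀ (fuel : Nat) (qa : List (Int × List Int)) (qb : List (Int × Option Int × Int))
      (visited : PySem.Set Int), List.Forall₂ (entryRel start) qa qb →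
      loopA start target items fuel qa visited
        = loopB target (buildPreds items) fuel qb visited := by
  intro fuel
  induction fuel with
  | zero => intro qa qb visited _; rfl
  | succ f ih =>
      intro qa qb visited hrel
      cases hrel with
      | nil => rfl
      | cons hab hrest =>
        rename_i a b qa' qb'
        obtain ⟨cur, path⟩ := a
        obtain ⟨node, parent, depth⟩ := b
        obtain ⟨hnode, hne, hhead, hlast, hdepth, hparent⟩ := hab
        simp only at hnode hne hhead hlast hdepth hparent
        subst hnode
        have hstart : start ∈ path := head?_mem hhead
        have hlen1 : 1 ≤ path.length := List.length_pos_iff.mpr hne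
        -- the common continuation (visited check + expansion)
        have hcontinue :
            (if visited.contains node then loopA start target items f qa' visited
             else loopA start target items f
               (qa' ++ items.foldl
                 (fun acc kv => if node ∈ kv.2 then acc ++ [(kv.1, path ++ [kv.1])] else acc) [])
               (PySem.Set.add visited node))
          = (if visited.contains node then loopB target (buildPreds items) f qb' visited
             else loopB target (buildPreds items) f
               (qb' ++ ((buildPreds items).getD node []).map (fun k => (k, some node, depth + 1)))
               (PySem.Set.add visited node)) := by
          by_cases hv : visited.contains node
          · rw [if_pos hv, if_pos hv]; exact ih _ _ _ hrest
          · rw [if_neg hv, if_neg hv]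
            apply ih
            apply List.rel_append hrest
            rw [foldl_append_entries, getD_buildPreds, List.nil_append]
            have hA : (items.filter (fun kv => decide (node ∈ kv.2))).map
                  (fun kv => (kv.1, path ++ [kv.1]))
                = ((items.filter (fun kv => decide (node ∈ kv.2))).map (·.1)).map
                    (fun k => (k, path ++ [k])) := by rw [List.map_map]; rfl
            rw [hA]
            exact forall₂_append_entries start node path hne hhead hlast _ depth hdepth
        show loopA start target items (f + 1) ((node, path) :: qa') visited
            = loopB target (buildPreds items) (f + 1) ((node, parent, depth) :: qb') visited
        by_cases htgt : node = target
        · subst htgt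
          simp only [loopA, loopB, if_pos hstart,
            forloopA_spec path node hlast]
          by_cases h3 : 3 ≤ path.length
          · have h2 : 2 ≤ depth := by omega
            have hp := hparent (by omega)
            have hidx : path.length - 2 < path.length := by omega
            have hx : path[path.length - 2]? = some path[path.length - 2] :=
              List.getElem?_eq_getElem hidx
            rw [if_pos h3, hx, if_pos (show True ∧ 2 ≤ depth from ⟨trivial, h2⟩), hp, hx]
            simp
          · have h2 : ¬ (2 ≤ depth) := by omega
            rw [if_neg h3, if_neg (show ¬ (True ∧ 2 ≤ depth) from fun hc => h2 hc.2)]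
            exact hcontinue
        · simp only [loopA, loopB]
          rw [if_neg htgt, if_neg (show ¬ (node = target ∧ 2 ≤ depth) from fun hc => htgt hc.1)]
          exact hcontinue

-- ===== VERDICT (by name: the statement is the Claim_ definition above) =====
theorem return_position_spec : Claim_equal_return_position := by
  intro start target my_dict _
  unfold Spec_return_position return_position return_position_alt
  exact loop_eq start target _ _ _ _ _
    (List.Forall₂.cons ⟨rfl, by simp, rfl, rfl, by simp, by intro h; simp at h⟩ List.Forall₂.nil)
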